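-- pv_equiv track=rewrite | github.com/kfuku52/kfbatch | kfbatch/stat.py | _split_scontrol_named_blocks
-- ===== SOURCE A (Python) =====
-- def _split_scontrol_named_blocks(lines, anchor_key):
--     blocks = []
--     current = []
--     for raw_line in lines:
--         line = raw_line.strip()
--         if line=='':
--             if current:
--                 blocks.append(current)
--                 current = []
--             continue
--         if line.startswith(anchor_key) and current:
--             blocks.append(current)
--             current = [line]
--             continue
--         if not current:
--             current = [line]
--         else:
--             current.append(line)
--     if current:
--         blocks.append(current)
--     return blocks
-- ===== SOURCE B (Python) =====
-- def _split_scontrol_named_blocks(lines, anchor_key):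
--     # Pass 1: group stripped lines into blank-delimited segments.
--     segments = []
--     seg = []
--     for raw_line in lines:
--         s = raw_line.strip()
--         if s:
--             seg.append(s)
--         else:
--             if seg:
--                 segments.append(seg)
--                 seg = []
--     if seg:
--         segments.append(seg)
--     # Pass 2: split each segment at every anchor line after its first line.
--     result = []
--     for seg in segments:
--         block = [seg[0]]
--         for s in seg[1:]:
--             if s.startswith(anchor_key):
--                 result.append(block)
--                 block = [s]
--             else:
--                 block.append(s)
--         result.append(block)
--     return result
-- ===== Notes on version B (the rewrite author's own statement) =====
-- stated objective: alternative
-- what changed: Replaces the single stateful accumulator loop (blank-flush and anchor-split interleaved in one state machine) by a two-pass decomposition: first group stripped lines into blank-delimited segments, then split each segment at anchor lines.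
import Mathlib
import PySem

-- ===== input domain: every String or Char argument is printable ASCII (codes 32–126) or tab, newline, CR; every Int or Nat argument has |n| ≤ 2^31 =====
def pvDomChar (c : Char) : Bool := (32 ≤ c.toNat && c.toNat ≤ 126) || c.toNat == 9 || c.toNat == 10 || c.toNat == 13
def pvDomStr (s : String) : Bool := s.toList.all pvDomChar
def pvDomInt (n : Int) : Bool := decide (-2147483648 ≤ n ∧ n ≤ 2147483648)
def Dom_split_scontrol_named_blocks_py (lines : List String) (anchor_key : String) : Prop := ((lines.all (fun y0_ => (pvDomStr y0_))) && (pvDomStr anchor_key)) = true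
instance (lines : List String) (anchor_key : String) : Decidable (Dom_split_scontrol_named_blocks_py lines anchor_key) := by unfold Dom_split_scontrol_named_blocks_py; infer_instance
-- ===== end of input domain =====

-- B replaces A's single stateful accumulator loop by a two-pass decomposition
-- (group stripped lines into blank-delimited segments, then split each segment
-- at anchor lines); alternative structure, same cost.


-- ===== PORT A =====
-- one step of A's for-loop over raw lines; state = (blocks, current)
def pvStepA (anchor_key : String) (st : List (List String) × List String)
    (raw_line : String) : List (List String) × List String :=
  let line := PySem.Str.strip raw_line
  if line = "" then
    (if st.2 ≠ [] then (st.1 ++ [st.2], []) else st)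
  else if PySem.Str.startswith line anchor_key && !st.2.isEmpty then
    (st.1 ++ [st.2], [line])
  else if st.2.isEmpty then (st.1, [line]) else (st.1, st.2 ++ [line])

def split_scontrol_named_blocks_py (lines : List String) (anchor_key : String) : List (List String) :=
  let st := lines.foldl (pvStepA anchor_key) ([], [])
  if st.2 ≠ [] then st.1 ++ [st.2] else st.1

-- ===== PORT B =====
-- pass 1 step: accumulate a run of non-blank stripped lines, flush at blanks
def pvStepSeg (st : List (List String) × List String)
    (raw_line : String) : List (List String) × List String :=
  let s := PySem.Str.strip raw_line
  if s ≠ "" then (st.1, st.2 ++ [s])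
  else if st.2 ≠ [] then (st.1 ++ [st.2], []) else st

-- pass 2 inner step: start a new block at each anchor line
def pvStepB (anchor_key : String) (st : List (List String) × List String)
    (s : String) : List (List String) × List String :=
  if PySem.Str.startswith s anchor_key then (st.1 ++ [st.2], [s]) else (st.1, st.2 ++ [s])

-- split one (nonempty) segment at anchor lines after its first line
def pvSplitSeg (anchor_key : String) (seg : List String) : List (List String) :=
  match seg with
  | [] => []  -- unreachable: segments produced by pass 1 are nonempty
  | h :: t =>
    let st := t.foldl (pvStepB anchor_key) (([] : List (List String)), [h])
    st.1 ++ [st.2]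

def split_scontrol_named_blocks_py_alt (lines : List String) (anchor_key : String) : List (List String) :=
  let st := lines.foldl pvStepSeg ([], [])
  let segments := if st.2 ≠ [] then st.1 ++ [st.2] else st.1
  segments.foldl (fun res seg => res ++ pvSplitSeg anchor_key seg) []

-- ===== PRECONDITION & SPEC =====
def Spec_split_scontrol_named_blocks_py (lines : List String) (anchor_key : String) (out : List (List String)) : Prop := out = split_scontrol_named_blocks_py_alt lines anchor_key
instance (lines : List String) (anchor_key : String) (out : List (List String)) : Decidable (Spec_split_scontrol_named_blocks_py lines anchor_key out) := by unfold Spec_split_scontrol_named_blocks_py; infer_instance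

-- ===== CLAIM (what is proved, stated in full; the proofs are below) =====
def Claim_equal_split_scontrol_named_blocks_py : Prop := ∀ (lines : List String) (anchor_key : String), Dom_split_scontrol_named_blocks_py lines anchor_key → Spec_split_scontrol_named_blocks_py lines anchor_key (split_scontrol_named_blocks_py lines anchor_key)

-- ===== LEMMAS AND PROOFS =====

-- recursive characterisation of A's loop (pending block `cur`)
def runA (a : String) : List String → List String → List (List String)
  | cur, [] => if cur = [] then [] else [cur]
  | cur, raw :: rest =>
    let s := PySem.Str.strip raw
    if s = "" then (if cur = [] then runA a [] rest else cur :: runA a [] rest)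
    else if PySem.Str.startswith s a && !cur.isEmpty then cur :: runA a [s] rest
    else runA a (cur ++ [s]) rest

-- recursive characterisation of B's pass 1 (pending segment `cur`)
def runSeg : List String → List String → List (List String)
  | cur, [] => if cur = [] then [] else [cur]
  | cur, raw :: rest =>
    let s := PySem.Str.strip raw
    if s = "" then (if cur = [] then runSeg [] rest else cur :: runSeg [] rest)
    else runSeg (cur ++ [s]) rest

-- B's two passes fused: split each finished segment as it is flushed
def runBB (a : String) : List String → List String → List (List String)
  | cur, [] => if cur = [] then [] else pvSplitSeg a cur
  | cur, raw :: rest =>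
    let s := PySem.Str.strip raw
    if s = "" then (if cur = [] then runBB a [] rest else pvSplitSeg a cur ++ runBB a [] rest)
    else runBB a (cur ++ [s]) rest

-- continuation of B inside a segment, with the pass-2 state already computed
def goB (a : String) : (List (List String) × List String) → List String → List (List String)
  | st, [] => st.1 ++ [st.2]
  | st, raw :: rest =>
    let s := PySem.Str.strip raw
    if s = "" then (st.1 ++ [st.2]) ++ runBB a [] rest
    else goB a (pvStepB a st s) rest

-- pass-2 state after consuming a nonempty segment prefix
def pvF (a : String) : List String → List (List String) × List String
  | [] => ([], [])
  | h :: t => t.foldl (pvStepB a) ([], [h])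

theorem lemA (a : String) (lines : List String) :
    ∀ blocks cur, (let st := lines.foldl (pvStepA a) (blocks, cur);
      if st.2 ≠ [] then st.1 ++ [st.2] else st.1) = blocks ++ runA a cur lines := by
  induction lines with
  | nil => intro blocks cur; by_cases h : cur = [] <;> simp [runA, h]
  | cons raw rest ih =>
    intro blocks cur
    simp only [List.foldl, runA, pvStepA]
    by_cases hs : PySem.Str.strip raw = ""
    · by_cases hc : cur = [] <;> simp [hs, hc, ih]
    · by_cases hc : cur = [] <;>
        by_cases hk : PySem.Chars.startswith (PySem.Chars.strip raw.toList) a.toList = true <;>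
        simp [hs, hc, hk, ih]

theorem lemSeg (lines : List String) :
    ∀ segs cur, (let st := lines.foldl pvStepSeg (segs, cur);
      if st.2 ≠ [] then st.1 ++ [st.2] else st.1) = segs ++ runSeg cur lines := by
  induction lines with
  | nil => intro segs cur; by_cases h : cur = [] <;> simp [runSeg, h]
  | cons raw rest ih =>
    intro segs cur
    simp only [List.foldl, runSeg, pvStepSeg]
    by_cases hs : PySem.Str.strip raw = ""
    · by_cases hc : cur = [] <;> simp [hs, hc, ih]
    · simp [hs, ih]

theorem foldl_append_f {α β : Type} (f : α → List β) (l : List α) :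
    ∀ res : List β, l.foldl (fun r x => r ++ f x) res = res ++ l.flatMap f := by
  induction l with
  | nil => simp
  | cons x t ih => intro res; simp [List.foldl, ih]

theorem lemFlat (a : String) (lines : List String) :
    ∀ cur, (runSeg cur lines).flatMap (pvSplitSeg a) = runBB a cur lines := by
  induction lines with
  | nil => intro cur; by_cases h : cur = [] <;> simp [runSeg, runBB, h]
  | cons raw rest ih =>
    intro cur
    simp only [runSeg, runBB]
    by_cases hs : PySem.Str.strip raw = ""
    · by_cases hc : cur = [] <;> simp [hs, hc, ih]
    · simp [hs, ih]

theorem pvF_append (a : String) (cur : List String) (h : cur ≠ []) (s : String) :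
    pvF a (cur ++ [s]) = pvStepB a (pvF a cur) s := by
  cases cur with
  | nil => exact absurd rfl h
  | cons x t => simp [pvF, List.foldl_append]

theorem splitSeg_eq_pvF (a : String) (cur : List String) (h : cur ≠ []) :
    pvSplitSeg a cur = (pvF a cur).1 ++ [(pvF a cur).2] := by
  cases cur with
  | nil => exact absurd rfl h
  | cons x t => rfl

theorem lemGo (a : String) (rest : List String) :
    ∀ cur, cur ≠ [] → runBB a cur rest = goB a (pvF a cur) rest := by
  induction rest with
  | nil => intro cur h; simp [runBB, goB, h, splitSeg_eq_pvF a cur h]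
  | cons raw rest ih =>
    intro cur h
    simp only [runBB, goB]
    by_cases hs : PySem.Str.strip raw = ""
    · simp [hs, h, splitSeg_eq_pvF a cur h]
    · have hne : cur ++ [PySem.Str.strip raw] ≠ [] := by simp
      simp [hs, ih _ hne, pvF_append a cur h]

theorem lemMain (a : String) (lines : List String) :
    (runBB a [] lines = runA a [] lines) ∧
    (∀ st : List (List String) × List String, st.2 ≠ [] →
      goB a st lines = st.1 ++ runA a st.2 lines) := by
  induction lines with
  | nil =>
    constructor
    · simp [runBB, runA]
    · intro st h; simp [goB, runA, h]
  | cons raw rest ih =>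
    obtain ⟨ih1, ih2⟩ := ih
    constructor
    · simp only [runBB, runA]
      by_cases hs : PySem.Str.strip raw = ""
      · simp [hs, ih1]
      · have h3 := ih2 (([] : List (List String)), [PySem.Str.strip raw]) (by simp)
        have h2 := lemGo a rest [PySem.Str.strip raw] (by simp)
        simp only [pvF, List.foldl] at h2
        simp [hs, h2, h3]
    · intro st h
      simp only [goB, runA]
      by_cases hs : PySem.Str.strip raw = ""
      · simp [hs, h, ih1]
      · have hne : st.2.isEmpty = false := by
          cases h2 : st.2 with
          | nil => exact absurd h2 h
          | cons x t => simp
        by_cases hk : PySem.Chars.startswith (PySem.Chars.strip raw.toList) a.toList = true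
        · have h4 := ih2 (st.1 ++ [st.2], [PySem.Str.strip raw]) (by simp)
          simp [hs, hk, hne, pvStepB, h4]
        · have h4 := ih2 (st.1, st.2 ++ [PySem.Str.strip raw]) (by simp)
          simp [hs, hk, hne, pvStepB, h4]

-- ===== VERDICT (by name: the statement is the Claim_ definition above) =====
theorem split_scontrol_named_blocks_py_spec : Claim_equal_split_scontrol_named_blocks_py := by
  intro lines anchor_key _
  show split_scontrol_named_blocks_py lines anchor_key = split_scontrol_named_blocks_py_alt lines anchor_key
  have e1 : split_scontrol_named_blocks_py lines anchor_key = runA anchor_key [] lines := by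
    have hA := lemA anchor_key lines [] []
    simp only [List.nil_append] at hA
    show (if (List.foldl (pvStepA anchor_key) ([], []) lines).2 ≠ [] then
        (List.foldl (pvStepA anchor_key) ([], []) lines).1 ++
          [(List.foldl (pvStepA anchor_key) ([], []) lines).2]
      else (List.foldl (pvStepA anchor_key) ([], []) lines).1) = runA anchor_key [] lines
    exact hA
  have e2 : split_scontrol_named_blocks_py_alt lines anchor_key = runBB anchor_key [] lines := by
    have hS := lemSeg lines [] []
    simp only [List.nil_append] at hS
    show List.foldl (fun res seg => res ++ pvSplitSeg anchor_key seg)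
        ([] : List (List String))
        (if (List.foldl pvStepSeg ([], []) lines).2 ≠ [] then
          (List.foldl pvStepSeg ([], []) lines).1 ++ [(List.foldl pvStepSeg ([], []) lines).2]
        else (List.foldl pvStepSeg ([], []) lines).1) = runBB anchor_key [] lines
    rw [hS, foldl_append_f, lemFlat]
    rfl
  rw [e1, e2, (lemMain anchor_key lines).1]
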